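-- pv_equiv track=rewrite | github.com/OfficeChromatography/OC-Manager3 | app/analysis/core/hptlc_insight/analysis_core.py | create_reference_dict
-- ===== SOURCE A (Python) =====
-- def create_reference_dict(tracks, reference):
--     reference_dir = {}
--     for idx in range(len(tracks)):
--         if idx in reference:
--             reference_dir[str(idx + 1)] = 'red'
--         else:
--             reference_dir[str(idx + 1)] = 'black'
--     return reference_dir
-- ===== SOURCE B (Python) =====
-- def create_reference_dict(tracks, reference):
--     reference_dir = {str(i + 1): 'black' for i in range(len(tracks))}
--     for idx in reference:
--         if 0 <= idx < len(tracks):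
--             reference_dir[str(idx + 1)] = 'red'
--     return reference_dir
-- ===== Notes on version B (the rewrite author's own statement) =====
-- stated objective: faster
-- what changed: Replaces the per-index membership test 'idx in reference' inside the loop by a two-pass initialize-then-mark structure: build all-black dict over the tracks, then walk the reference list once marking in-range indices red.
import Mathlib
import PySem

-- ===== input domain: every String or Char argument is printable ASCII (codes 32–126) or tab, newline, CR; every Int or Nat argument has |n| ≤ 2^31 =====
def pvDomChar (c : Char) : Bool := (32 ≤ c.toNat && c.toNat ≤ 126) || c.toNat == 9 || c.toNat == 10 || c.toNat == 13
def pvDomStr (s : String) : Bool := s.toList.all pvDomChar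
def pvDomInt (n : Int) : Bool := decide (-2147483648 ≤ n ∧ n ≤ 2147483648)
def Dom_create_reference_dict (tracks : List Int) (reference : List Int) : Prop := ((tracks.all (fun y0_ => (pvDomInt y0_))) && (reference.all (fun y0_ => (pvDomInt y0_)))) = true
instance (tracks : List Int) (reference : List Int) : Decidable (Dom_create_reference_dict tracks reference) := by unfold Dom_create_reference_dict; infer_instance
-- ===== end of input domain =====

-- B replaces A's per-index membership test by an initialize-all-black then mark-red two-pass structure (faster on large reference lists).


-- ===== PORT A =====
def create_reference_dict (tracks : List Int) (reference : List Int) : List (String × String) :=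
  ((PySem.List.pyRange 0 (tracks.length : Int) 1).foldl
    (fun d idx =>
      if reference.contains idx then
        d.insert (PySem.Int.toStr (idx + 1)) "red"
      else
        d.insert (PySem.Int.toStr (idx + 1)) "black")
    PySem.Dict.empty).items

-- ===== PORT B =====
def create_reference_dict_alt (tracks : List Int) (reference : List Int) : List (String × String) :=
  let init : PySem.Dict String String :=
    (PySem.List.pyRange 0 (tracks.length : Int) 1).foldl
      (fun d i => d.insert (PySem.Int.toStr (i + 1)) "black") PySem.Dict.empty
  (reference.foldl
    (fun d idx =>
      if 0 ≤ idx ∧ idx < (tracks.length : Int) then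
        d.insert (PySem.Int.toStr (idx + 1)) "red"
      else d)
    init).items

-- ===== PRECONDITION & SPEC =====
def Spec_create_reference_dict (tracks : List Int) (reference : List Int) (out : List (String × String)) : Prop := out = create_reference_dict_alt tracks reference
instance (tracks : List Int) (reference : List Int) (out : List (String × String)) : Decidable (Spec_create_reference_dict tracks reference out) := by unfold Spec_create_reference_dict; infer_instance

-- ===== CLAIM (what is proved, stated in full; the proofs are below) =====
def Claim_equal_create_reference_dict : Prop := ∀ (tracks : List Int) (reference : List Int), Dom_create_reference_dict tracks reference → Spec_create_reference_dict tracks reference (create_reference_dict tracks reference)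

-- ===== LEMMAS AND PROOFS =====

-- `Nat.toDigits 10` agrees with Mathlib's `Nat.digits` (reversed, digit chars) when given enough fuel.
theorem toDigitsCore_eq_digits (f : Nat) : ∀ (n : Nat) (acc : List Char), 0 < n → n ≤ f →
    Nat.toDigitsCore 10 f n acc = ((Nat.digits 10 n).map Nat.digitChar).reverse ++ acc := by
  induction f with
  | zero => intro n acc hn hf; omega
  | succ f ih =>
    intro n acc hn hf
    rw [Nat.toDigitsCore]
    rw [Nat.digits_def' (by norm_num : 1 < 10) hn]
    by_cases h : n / 10 = 0
    · simp [h]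
    · rw [if_neg h, ih (n / 10) _ (by omega) (by omega)]
      simp

-- digitChar is injective below 10
theorem digitChar_inj {x y : Nat} (hx : x < 10) (hy : y < 10)
    (h : Nat.digitChar x = Nat.digitChar y) : x = y := by
  interval_cases x <;> interval_cases y <;> simp_all [Nat.digitChar]

theorem map_digitChar_inj : ∀ (l1 l2 : List Nat), (∀ x ∈ l1, x < 10) → (∀ x ∈ l2, x < 10) →
    l1.map Nat.digitChar = l2.map Nat.digitChar → l1 = l2 := by
  intro l1
  induction l1 with
  | nil => intro l2 _ _ h; cases l2 <;> simp_all
  | cons x xs ih =>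
    intro l2 h1 h2 h
    cases l2 with
    | nil => simp at h
    | cons y ys =>
      simp only [List.map_cons, List.cons.injEq] at h
      have hx := digitChar_inj (h1 x (by simp)) (h2 y (by simp)) h.1
      have := ih ys (fun a ha => h1 a (by simp [ha])) (fun a ha => h2 a (by simp [ha])) h.2
      simp [hx, this]

theorem toDigits_inj_pos {a b : Nat} (ha : 0 < a) (hb : 0 < b)
    (h : Nat.toDigits 10 a = Nat.toDigits 10 b) : a = b := by
  unfold Nat.toDigits at h
  rw [toDigitsCore_eq_digits (a + 1) a [] ha (by omega),
      toDigitsCore_eq_digits (b + 1) b [] hb (by omega)] at h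
  simp only [List.append_nil, List.reverse_inj] at h
  exact Nat.digits.injective 10 (map_digitChar_inj _ _
    (fun x hx => Nat.digits_lt_base (by norm_num) hx)
    (fun x hx => Nat.digits_lt_base (by norm_num) hx) h)

theorem toStr_inj_pos {a b : Int} (ha : 0 < a) (hb : 0 < b)
    (h : PySem.Int.toStr a = PySem.Int.toStr b) : a = b := by
  have hc : PySem.Int.toChars a = PySem.Int.toChars b := by
    have := congrArg String.toList h
    simpa [PySem.Int.toStr] using this
  simp only [PySem.Int.toChars, if_neg (by omega : ¬ a < 0), if_neg (by omega : ¬ b < 0)] at hc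
  have := toDigits_inj_pos (a := a.toNat) (b := b.toNat) (by omega) (by omega) hc
  omega

-- keys built from the range are pairwise distinct
theorem keys_nodup (n : Nat) :
    ((PySem.List.pyRange 0 (n : Int) 1).map (fun a => PySem.Int.toStr (a + 1))).Nodup := by
  apply List.Nodup.map_on _ (PySem.List.nodup_pyRange_one 0 (n : Int))
  intro a ha b hb h
  rw [PySem.List.mem_pyRange_one] at ha hb
  have := toStr_inj_pos (a := a + 1) (b := b + 1) (by omega) (by omega) h
  omega

-- A's loop builds exactly the labelled range, in order
theorem itemsA (n : Nat) (r : List Int) :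
    (((PySem.List.pyRange 0 (n : Int) 1)).foldl
      (fun d idx => if r.contains idx then d.insert (PySem.Int.toStr (idx + 1)) "red"
                    else d.insert (PySem.Int.toStr (idx + 1)) "black")
      PySem.Dict.empty).items
    = (PySem.List.pyRange 0 (n : Int) 1).map
        (fun i => (PySem.Int.toStr (i + 1), if r.contains i then "red" else "black")) := by
  have hf : (fun (d : PySem.Dict String String) idx =>
      if r.contains idx then d.insert (PySem.Int.toStr (idx + 1)) "red"
      else d.insert (PySem.Int.toStr (idx + 1)) "black")
      = fun d idx => d.insert (PySem.Int.toStr (idx + 1)) (if r.contains idx then "red" else "black") := by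
    funext d idx; split <;> rfl
  rw [hf, PySem.Dict.items_foldl_insert_fresh _ _ _ _ (by simp [PySem.Dict.contains_empty]) (keys_nodup n)]
  simp [PySem.Dict.empty]

-- B's first pass builds the all-black labelled range
theorem itemsInit (n : Nat) :
    (((PySem.List.pyRange 0 (n : Int) 1)).foldl
      (fun d i => d.insert (PySem.Int.toStr (i + 1)) "black")
      (PySem.Dict.empty : PySem.Dict String String)).items
    = (PySem.List.pyRange 0 (n : Int) 1).map
        (fun i => (PySem.Int.toStr (i + 1), "black")) := by
  rw [PySem.Dict.items_foldl_insert_fresh _ _ _ _ (by simp [PySem.Dict.contains_empty]) (keys_nodup n)]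
  simp [PySem.Dict.empty]

-- B's marking pass turns exactly the in-range referenced entries red
theorem mark_items (n : Nat) : ∀ (r : List Int) (f : Int → String),
    (r.foldl
        (fun d idx => if 0 ≤ idx ∧ idx < (n : Int) then d.insert (PySem.Int.toStr (idx + 1)) "red" else d)
        (PySem.Dict.mk ((PySem.List.pyRange 0 (n : Int) 1).map
          (fun i => (PySem.Int.toStr (i + 1), f i))))).items
    = (PySem.List.pyRange 0 (n : Int) 1).map
        (fun i => (PySem.Int.toStr (i + 1), if r.contains i then "red" else f i)) := by
  intro r
  induction r with
  | nil => intro f; simp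
  | cons idx rest ih =>
    intro f
    rw [List.foldl_cons]
    by_cases h : 0 ≤ idx ∧ idx < (n : Int)
    · rw [if_pos h]
      have hcon : (PySem.Dict.mk ((PySem.List.pyRange 0 (n : Int) 1).map
          (fun i => (PySem.Int.toStr (i + 1), f i)))).contains (PySem.Int.toStr (idx + 1)) = true := by
        rw [PySem.Dict.contains_eq_decide_mem_keys]
        simp only [PySem.Dict.keys_mk, decide_eq_true_eq, List.map_map]
        exact List.mem_map_of_mem ((PySem.List.mem_pyRange_one).2 ⟨h.1, h.2⟩)
      have hins : ((PySem.Dict.mk ((PySem.List.pyRange 0 (n : Int) 1).map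
            (fun i => (PySem.Int.toStr (i + 1), f i)))).insert (PySem.Int.toStr (idx + 1)) "red")
          = PySem.Dict.mk ((PySem.List.pyRange 0 (n : Int) 1).map
            (fun i => (PySem.Int.toStr (i + 1), if i = idx then "red" else f i))) := by
        apply PySem.Dict.ext
        rw [PySem.Dict.items_insert_of_contains _ _ hcon]
        show ((PySem.List.pyRange 0 (n : Int) 1).map _).map _ = _
        rw [List.map_map]
        apply List.map_congr_left
        intro i hi
        rw [PySem.List.mem_pyRange_one] at hi
        by_cases hii : i = idx
        · simp [hii]
        · have hne : PySem.Int.toStr (i + 1) ≠ PySem.Int.toStr (idx + 1) := by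
            intro hc
            exact hii (by have := toStr_inj_pos (a := i + 1) (b := idx + 1) (by omega) (by omega) hc; omega)
          simp [Function.comp, hne, hii]
      rw [hins, ih (fun i => if i = idx then "red" else f i)]
      apply List.map_congr_left
      intro i _
      by_cases hii : i = idx <;> by_cases hr : rest.contains i <;>
        simp [hii]
    · rw [if_neg h, ih f]
      apply List.map_congr_left
      intro i hi
      rw [PySem.List.mem_pyRange_one] at hi
      have : i ≠ idx := by omega
      simp [this]

-- ===== VERDICT (by name: the statement is the Claim_ definition above) =====
theorem create_reference_dict_spec : Claim_equal_create_reference_dict := by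
  unfold Claim_equal_create_reference_dict
  intro tracks reference _
  unfold Spec_create_reference_dict create_reference_dict create_reference_dict_alt
  rw [itemsA tracks.length reference]
  have hinit : ((PySem.List.pyRange 0 (tracks.length : Int) 1).foldl
      (fun d i => d.insert (PySem.Int.toStr (i + 1)) "black")
      (PySem.Dict.empty : PySem.Dict String String))
      = PySem.Dict.mk ((PySem.List.pyRange 0 (tracks.length : Int) 1).map
          (fun i => (PySem.Int.toStr (i + 1), (fun _ => "black") i))) := by
    apply PySem.Dict.ext
    exact itemsInit tracks.length
  rw [hinit]
  rw [mark_items tracks.length reference (fun _ => "black")]
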